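-- pv_equiv track=rewrite | github.com/FIREpresent/EGE | MSHP/29022025/№10.py | f
-- ===== SOURCE A (Python) =====
-- def f(n):
--     if n == 0:
--         return 0
--     elif n > 0:
--         if n % 2 == 0:
--             return f(n//2) + 3
--         elif n % 2 != 0:
--             return 2*f(n-1)+1
-- ===== SOURCE B (Python) =====
-- def f(n):
--     # Different decomposition: read n's binary digits (low to high) once and
--     # accumulate the answer with a running power p = 2**(ones seen so far).
--     # For n <= 0 the bit string is empty and we return 0 (A returns None on n < 0;
--     # those inputs are excluded by Pre_).
--     bits = bin(n)[2:] if n > 0 else ""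
--     total, p = 0, 1
--     last = len(bits) - 1
--     for i, b in enumerate(reversed(bits)):
--         if b == '1':
--             total += p
--             p *= 2
--         if i < last:
--             total += 3 * p
--     return total
-- ===== Notes on version B (the rewrite author's own statement) =====
-- stated objective: alternative
-- what changed: Replaced the mixed halve/decrement recursion by a single left-fold over n's binary digits (low bit first) that accumulates the result with a running power of two counting the one-bits seen so far.
-- outside the precondition, e.g. on f(-1): A returns None, B returns 0
import Mathlib
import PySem

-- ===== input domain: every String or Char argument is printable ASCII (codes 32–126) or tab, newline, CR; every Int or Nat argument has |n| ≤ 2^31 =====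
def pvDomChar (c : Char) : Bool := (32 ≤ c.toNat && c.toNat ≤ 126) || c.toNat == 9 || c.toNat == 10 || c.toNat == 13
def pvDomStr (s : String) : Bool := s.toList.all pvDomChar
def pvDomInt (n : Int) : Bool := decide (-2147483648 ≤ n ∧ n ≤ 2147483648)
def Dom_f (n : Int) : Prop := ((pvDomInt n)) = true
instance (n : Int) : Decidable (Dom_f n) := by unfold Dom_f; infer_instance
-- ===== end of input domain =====

-- B replaces A's recursion by a single pass over n's binary digits (low bit first); return-value equivalence on n ≥ 0.

-- ===== PORT A =====
def f (n : Int) : Int :=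
  if n = 0 then 0
  else if n > 0 then
    if PySem.Int.mod n 2 = 0 then f (PySem.Int.floordiv n 2) + 3
    else 2 * f (n - 1) + 1
  else 0  -- Python returns None here; excluded by Pre_f
termination_by n.toNat
decreasing_by
  · have h : PySem.Int.floordiv n 2 = n / 2 := PySem.Int.floordiv_eq_ediv_of_pos (by omega)
    rw [h]; omega
  · omega

-- ===== PORT B =====
-- binary digits of n, low bit first (= reversed(bin(n)[2:]) in Source B; empty for n ≤ 0)
def f_bits (n : Int) : List Int :=
  if n > 0 then PySem.Int.mod n 2 :: f_bits (PySem.Int.floordiv n 2) else []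
termination_by n.toNat
decreasing_by
  have h : PySem.Int.floordiv n 2 = n / 2 := PySem.Int.floordiv_eq_ediv_of_pos (by omega)
  rw [h]; omega

-- Source B's for-loop over the digit list; 'rest ≠ []' is Source B's 'i < last'
def f_go : List Int → Int → Int → Int
  | [], total, _ => total
  | b :: rest, total, p =>
      let total := if b = 1 then total + p else total
      let p := if b = 1 then 2 * p else p
      let total := if rest ≠ [] then total + 3 * p else total
      f_go rest total p

def f_alt (n : Int) : Int := f_go (f_bits n) 0 1

-- ===== PRECONDITION & SPEC =====
-- Pre_f excludes n < 0, where Python's A falls off the end and returns None (not an int).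
def Pre_f (n : Int) : Prop := 0 ≤ n
instance (n : Int) : Decidable (Pre_f n) := by unfold Pre_f; infer_instance
def pvWitness_f : Int := 6

def Spec_f (n : Int) (out : Int) : Prop := out = f_alt n
instance (n : Int) (out : Int) : Decidable (Spec_f n out) := by unfold Spec_f; infer_instance

-- ===== CLAIM (what is proved, stated in full; the proofs are below) =====
def Claim_equal_f : Prop := ∀ (n : Int), Dom_f n → Pre_f n → Spec_f n (f n)

-- ===== LEMMAS AND PROOFS =====

theorem f_go_linear (n : Int) (hn : 0 < n) :
    ∀ total p : Int, f_go (f_bits n) total p = total + p * f n := by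
  induction hk : n.toNat using Nat.strong_induction_on generalizing n with
  | _ k ih => ?_
  have ih : ∀ m : Int, 0 < m → m < n → ∀ t p : Int, f_go (f_bits m) t p = t + p * f m :=
    fun m hm hlt => ih m.toNat (by omega) m hm rfl
  intro total p
  have hfd : PySem.Int.floordiv n 2 = n / 2 := PySem.Int.floordiv_eq_ediv_of_pos (by omega)
  have hm : PySem.Int.mod n 2 = n % 2 := PySem.Int.mod_eq_emod_of_pos (by omega)
  rw [f_bits]
  simp only [hn, if_true, hfd, hm]
  by_cases he : n % 2 = 0
  · -- even, n ≥ 2 so n/2 > 0 and the tail is nonempty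
    have h2 : 0 < n / 2 := by omega
    have hne : f_bits (n / 2) ≠ [] := by
      rw [f_bits]; simp [h2]
    rw [f_go]
    rw [if_neg (by omega : ¬ n % 2 = 1), if_neg (by omega : ¬ n % 2 = 1), if_pos hne]
    rw [ih (n / 2) h2 (by omega)]
    conv_rhs => rw [f]
    simp only [show n ≠ 0 by omega, if_false, hn, if_true, hm, he, if_true, hfd]
    ring
  · have ho : n % 2 = 1 := by omega
    rw [f_go]
    rw [if_pos ho, if_pos ho]
    by_cases h1 : n = 1
    · subst h1
      have hnil : f_bits ((1:Int)/2) = [] := by rw [f_bits]; norm_num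
      have hf1 : f 1 = 1 := by
        rw [f]
        norm_num [show PySem.Int.mod (1:Int) 2 = 1 from by decide]
        rw [f]; norm_num
      rw [hnil, if_neg (by simp), f_go, hf1]
      ring
    · -- odd n ≥ 3: tail f_bits (n/2) with n/2 > 0
      have h2 : 0 < n / 2 := by omega
      have hne : f_bits (n / 2) ≠ [] := by
        rw [f_bits]; simp [h2]
      rw [if_pos hne]
      rw [ih (n / 2) h2 (by omega)]
      -- f n = 2 * f (n-1) + 1 and f (n-1) = f ((n-1)/2) + 3 with (n-1)/2 = n/2
      have hfn : f n = 2 * f (n / 2) + 7 := by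
        rw [f]
        simp only [show n ≠ 0 by omega, if_false, hn, if_true, hm, ho]
        norm_num
        rw [f]
        have hn1 : n - 1 > 0 := by omega
        have hm1 : PySem.Int.mod (n - 1) 2 = (n - 1) % 2 := PySem.Int.mod_eq_emod_of_pos (by omega)
        have hfd1 : PySem.Int.floordiv (n - 1) 2 = (n - 1) / 2 := PySem.Int.floordiv_eq_ediv_of_pos (by omega)
        simp only [show n - 1 ≠ 0 by omega, if_false, hn1, if_true, hm1, hfd1,
          show (n - 1) % 2 = 0 by omega, if_true, show (n - 1) / 2 = n / 2 by omega]
        ring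
      rw [hfn]; ring

-- ===== VERDICT (by name: the statement is the Claim_ definition above) =====
theorem f_spec : Claim_equal_f := by
  intro n _ hpre
  unfold Spec_f f_alt
  by_cases h0 : n = 0
  · subst h0
    rw [f, f_bits]; norm_num [f_go]
  · have hp : (0:Int) ≤ n := hpre
    rw [f_go_linear n (by omega)]; ring
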